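-- pv_equiv track=rewrite | github.com/Y2Kiwy/Esercizi | Lezione5/exam.py | count_isolated
-- ===== SOURCE A (Python) =====
-- def count_isolated(input_list: list) -> int:
--     # If the list has less than two elements, return the length of the list
--     if len(input_list) < 2:
--         return len(input_list)
--
--     # Initialize a counter for isolated elements
--     isolated_counter: int = 0
--
--     # Check internal numbers of the list
--     for x in range(1, len(input_list)-1):
--         # If the current element is different from both its neighbors,
--         # then it is an isolated element
--         if input_list[x] != input_list[x-1] and input_list[x] != input_list[x+1]:
--             isolated_counter += 1
--
--     # Check the first and last elements separately
--     if input_list[0] != input_list[-1]: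
--         # If the first element is different from the second, it's isolated
--         if input_list[0] != input_list[1]:
--             isolated_counter += 1
--         # If the last element is different from the second last, it's isolated
--         if input_list[-1] != input_list[-2]:
--             isolated_counter += 1
--
--     return isolated_counter
-- ===== SOURCE B (Python) =====
-- def count_isolated(input_list: list) -> int:
--     # Run-length encode the list, merge the wrap-around run, count singleton runs.
--     n = len(input_list)
--     if n < 2:
--         return n
--     # stage 1: run-length encoding (value, length) by advancing over maximal runs
--     runs = []
--     i = 0
--     while i < n:
--         j = i
--         while j < n and input_list[j] == input_list[i]:
--             j += 1
--         runs.append((input_list[i], j - i))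
--         i = j
--     # stage 2: the list is circular for isolation purposes: merge first and last run
--     if len(runs) > 1 and runs[0][0] == runs[-1][0]:
--         runs = [(runs[0][0], runs[0][1] + runs[-1][1])] + runs[1:-1]
--     # stage 3: an element is isolated exactly when it forms a run of length 1
--     return sum(1 for _, c in runs if c == 1)
-- ===== Notes on version B (the rewrite author's own statement) =====
-- stated objective: alternative
-- what changed: Replaces A's per-index neighbor comparisons (interior loop plus special-cased first/last block) with a run-length encoding: build the (value,length) runs, merge the circular wrap-around run, and count the runs of length 1.
import Mathlib
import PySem

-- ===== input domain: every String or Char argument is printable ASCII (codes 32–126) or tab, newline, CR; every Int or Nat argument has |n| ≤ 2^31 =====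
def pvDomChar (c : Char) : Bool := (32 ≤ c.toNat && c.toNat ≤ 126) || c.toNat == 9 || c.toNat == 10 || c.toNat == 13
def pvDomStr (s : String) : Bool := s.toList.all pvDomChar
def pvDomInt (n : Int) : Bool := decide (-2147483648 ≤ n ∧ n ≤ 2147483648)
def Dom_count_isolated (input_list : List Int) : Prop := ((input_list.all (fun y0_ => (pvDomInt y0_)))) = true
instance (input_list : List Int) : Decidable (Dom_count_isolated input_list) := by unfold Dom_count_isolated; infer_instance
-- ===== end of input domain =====

-- B re-implements A by run-length encoding: build (value,length) runs, merge the circular wrap run, count singleton runs.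


-- ===== PORT A =====
def count_isolated (input_list : List Int) : Int :=
  if PySem.List.len input_list < 2 then PySem.List.len input_list
  else
    let c1 : Int := (PySem.List.pyRange 1 (PySem.List.len input_list - 1) 1).foldl
      (fun acc x =>
        if PySem.List.pyGetD input_list x 0 ≠ PySem.List.pyGetD input_list (x - 1) 0 ∧
           PySem.List.pyGetD input_list x 0 ≠ PySem.List.pyGetD input_list (x + 1) 0
        then acc + 1 else acc) 0
    if PySem.List.pyGetD input_list 0 0 ≠ PySem.List.pyGetD input_list (-1) 0 then
      let c2 := if PySem.List.pyGetD input_list 0 0 ≠ PySem.List.pyGetD input_list 1 0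
                then c1 + 1 else c1
      if PySem.List.pyGetD input_list (-1) 0 ≠ PySem.List.pyGetD input_list (-2) 0
      then c2 + 1 else c2
    else c1

-- ===== PORT B =====
-- inner while loop: length of the maximal prefix of l equal to v
def runLen (v : Int) : List Int → Nat
  | [] => 0
  | x :: xs => if x = v then runLen v xs + 1 else 0

-- outer while loop: run-length encoding, one recursive step per maximal run
def runsOf (l : List Int) : List (Int × Int) :=
  match l with
  | [] => []
  | x :: xs => (x, (runLen x xs : Int) + 1) :: runsOf (xs.drop (runLen x xs))
termination_by l.length
decreasing_by simp [List.length_drop]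

def count_isolated_alt (input_list : List Int) : Int :=
  let n := PySem.List.len input_list
  if n < 2 then n
  else
    let runs := runsOf input_list
    -- merge the wrap-around run (runs[0] with runs[-1]) when their values agree
    let runs2 := match runs with
      | (v1, c1) :: r :: rs =>
          let lst := (r :: rs).getLast (by simp)
          if v1 = lst.1 then (v1, c1 + lst.2) :: (r :: rs).dropLast else (v1, c1) :: r :: rs
      | other => other
    runs2.foldl (fun acc p => if p.2 = 1 then acc + 1 else acc) 0

-- ===== PRECONDITION & SPEC =====
def Spec_count_isolated (input_list : List Int) (out : Int) : Prop := out = count_isolated_alt input_list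
instance (input_list : List Int) (out : Int) : Decidable (Spec_count_isolated input_list out) := by unfold Spec_count_isolated; infer_instance

-- ===== CLAIM (what is proved, stated in full; the proofs are below) =====
def Claim_equal_count_isolated : Prop := ∀ (input_list : List Int), Dom_count_isolated input_list → Spec_count_isolated input_list (count_isolated input_list)

-- ===== LEMMAS AND PROOFS =====

-- last element (default 0) / second-to-last element of a list
def lastD (l : List Int) : Int := l.getLast?.getD 0

def slastD (l : List Int) : Int := lastD l.dropLast

def lastP (rs : List (Int × Int)) : Int × Int := rs.getLast?.getD (0, 0)

-- isolation count with virtual left context a and virtual right end b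
def lin (a : Int) : List Int → Int → Int
  | [], _ => 0
  | x :: xs, b => (if x ≠ a ∧ x ≠ xs.headD b then 1 else 0) + lin x xs b

-- the same count computed over a run list
def runCount (a : Int) : List (Int × Int) → Int → Int
  | [], _ => 0
  | (v, c) :: rs, b =>
      (if c = 1 ∧ v ≠ a ∧ v ≠ (rs.headD (b, 0)).1 then 1 else 0) + runCount v rs b

def cnt1 (rs : List (Int × Int)) : Int := (rs.countP (fun p => decide (p.2 = 1)) : Int)

-- count of interior isolated elements (both real neighbours)
def midC : List Int → Int
  | a :: x :: y :: t => (if x ≠ a ∧ x ≠ y then 1 else 0) + midC (x :: y :: t)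
  | _ => 0

theorem runLen_le (v : Int) (l : List Int) : runLen v l ≤ l.length := by
  induction l with
  | nil => simp [runLen]
  | cons x xs ih => simp only [runLen, List.length_cons]; split <;> simp <;> omega

theorem take_runLen (v : Int) (l : List Int) :
    l.take (runLen v l) = List.replicate (runLen v l) v := by
  induction l with
  | nil => simp [runLen]
  | cons x xs ih =>
    simp only [runLen]; split
    · next h => simp [List.replicate_succ, h, ih]
    · simp

theorem head_drop_runLen (v : Int) (l : List Int) (y : Int)
    (h : (l.drop (runLen v l)).head? = some y) : y ≠ v := by
  induction l with
  | nil => simp [runLen] at h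
  | cons x xs ih =>
    simp only [runLen] at h
    by_cases hx : x = v
    · rw [if_pos hx] at h
      simp only [List.drop_succ_cons] at h
      exact ih h
    · rw [if_neg hx] at h
      simp only [List.drop_zero, List.head?_cons, Option.some.injEq] at h
      exact fun hy => hx (h.trans hy)

theorem runsOf_ne_nil (l : List Int) (h : l ≠ []) : runsOf l ≠ [] := by
  cases l with
  | nil => simp at h
  | cons x xs => rw [runsOf]; simp

theorem counts_pos (l : List Int) : ∀ p ∈ runsOf l, 1 ≤ p.2 := by
  induction l using runsOf.induct with
  | case1 => simp [runsOf]
  | case2 x xs ih =>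
    rw [runsOf]
    intro p hp
    rcases List.mem_cons.1 hp with h | h
    · subst h; simp
    · exact ih p h

theorem lastD_cons (x : Int) (l : List Int) (h : l ≠ []) : lastD (x :: l) = lastD l := by
  cases l with
  | nil => exact absurd rfl h
  | cons y t => simp [lastD, List.getLast?_cons_cons]

theorem lastD_append (l1 l2 : List Int) (h : l2 ≠ []) : lastD (l1 ++ l2) = lastD l2 := by
  induction l1 with
  | nil => simp
  | cons a t ih => rw [List.cons_append, lastD_cons _ _ (by simp [h]), ih]

theorem lastP_cons (p : Int × Int) (rs : List (Int × Int)) (h : rs ≠ []) :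
    lastP (p :: rs) = lastP rs := by
  cases rs with
  | nil => exact absurd rfl h
  | cons q t => simp [lastP, List.getLast?_cons_cons]

theorem isChain_runsOf (l : List Int) :
    List.IsChain (fun p q : Int × Int => p.1 ≠ q.1) (runsOf l) := by
  induction l using runsOf.induct with
  | case1 => simp [runsOf]
  | case2 x xs ih =>
    rw [runsOf]
    rcases hr : runsOf (xs.drop (runLen x xs)) with _ | ⟨⟨y, c⟩, t⟩
    · simp
    · rw [hr] at ih
      refine List.IsChain.cons ih (fun p hp => ?_)
      -- y is the head of the drop
      have hd : (xs.drop (runLen x xs)) ≠ [] := by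
        intro he; rw [he] at hr; simp [runsOf] at hr
      rcases hx : xs.drop (runLen x xs) with _ | ⟨z, zs⟩
      · exact absurd hx hd
      · rw [hx, runsOf] at hr
        have hz : z = y := by simpa using congrArg (fun l => (l.headD (0,0)).1) hr
        have hzx := head_drop_runLen x xs z (by rw [hx]; rfl)
        simp only [List.head?_cons, Option.mem_def, Option.some.injEq] at hp
        subst hp
        intro hxy
        exact hzx (hz.trans hxy.symm)

theorem lastP_runsOf (l : List Int) (h : l ≠ []) : (lastP (runsOf l)).1 = lastD l := by
  induction l using runsOf.induct with
  | case1 => simp at h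
  | case2 x xs ih =>
    rw [runsOf]
    rcases hx : xs.drop (runLen x xs) with _ | ⟨z, zs⟩
    · -- l = replicate (k+1) x
      have : x :: xs = List.replicate (runLen x xs + 1) x := by
        rw [List.replicate_succ]
        have := take_runLen x xs
        conv_lhs => rw [← List.take_append_drop (runLen x xs) xs]
        rw [hx, this, List.append_nil]
      rw [hx] at *
      simp [runsOf, lastP, lastD, this, List.getLast?_replicate]
    · have hne : runsOf (z :: zs) ≠ [] := runsOf_ne_nil _ (by simp)
      have ihz : (lastP (runsOf (z :: zs))).1 = lastD (z :: zs) := by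
        have h2 := ih (by rw [hx]; simp)
        rwa [hx] at h2
      rw [lastP_cons _ _ hne, ihz]
      have hxs : xs ≠ [] := by intro he; rw [he] at hx; simp at hx
      rw [lastD_cons x xs hxs]
      conv_rhs => rw [← List.take_append_drop (runLen x xs) xs, hx]
      rw [lastD_append _ _ (by simp)]

theorem runsOf_singleton_total (l : List Int) (v c : Int)
    (h : runsOf l = [(v, c)]) : c = (l.length : Int) := by
  cases l with
  | nil => simp [runsOf] at h
  | cons x xs =>
    rw [runsOf] at h
    simp only [List.cons.injEq, Prod.mk.injEq] at h
    obtain ⟨⟨hv, hc⟩, hnil⟩ := h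
    have hrest : xs.drop (runLen x xs) = [] := by
      by_contra hne
      exact runsOf_ne_nil _ hne hnil
    have hle := runLen_le x xs
    have : xs.length ≤ runLen x xs := by
      have := congrArg List.length hrest
      simp [List.length_drop] at this
      omega
    simp only [List.length_cons, ← hc]
    omega

theorem lin_replicate (k : Nat) (a b x : Int) (rest : List Int) :
    lin a (List.replicate (k + 1) x ++ rest) b
      = (if k = 0 ∧ x ≠ a ∧ x ≠ rest.headD b then 1 else 0) + lin x rest b := by
  induction k generalizing a with
  | zero => simp [lin]
  | succ k ih =>
    rw [List.replicate_succ, List.cons_append, lin]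
    rw [show List.replicate (k+1) x ++ rest = x :: (List.replicate k x ++ rest) by
      rw [List.replicate_succ, List.cons_append]]
    rw [show (x :: (List.replicate k x ++ rest)).headD b = x from rfl]
    rw [← List.cons_append, ← List.replicate_succ, ih x]
    simp

theorem lin_eq_runCount (l : List Int) (a b : Int) :
    lin a l b = runCount a (runsOf l) b := by
  induction l using runsOf.induct generalizing a with
  | case1 => simp [lin, runsOf, runCount]
  | case2 x xs ih =>
    rw [runsOf, runCount]
    have hxs : x :: xs = List.replicate (runLen x xs + 1) x ++ xs.drop (runLen x xs) := by
      rw [List.replicate_succ, List.cons_append]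
      conv_lhs => rw [← List.take_append_drop (runLen x xs) xs, take_runLen]
    rw [hxs, lin_replicate, ih]
    congr 1
    have hcond : ((runLen x xs : Int) + 1 = 1) ↔ runLen x xs = 0 := by omega
    have hhead : ((runsOf (xs.drop (runLen x xs))).headD (b, 0)).1
        = (xs.drop (runLen x xs)).headD b := by
      rcases hx : xs.drop (runLen x xs) with _ | ⟨z, zs⟩
      · simp [runsOf]
      · rw [runsOf]; simp
    rw [hhead]
    by_cases h1 : runLen x xs = 0 <;> simp [h1, hcond]

theorem runCount_eq_cnt1 (rs : List (Int × Int)) (a b : Int) (h : rs ≠ [])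
    (ha : a ≠ ((rs.headD (0,0)).1))
    (hc : List.IsChain (fun p q : Int × Int => p.1 ≠ q.1) rs) :
    runCount a rs b
      = cnt1 rs.dropLast + (if (lastP rs).2 = 1 ∧ (lastP rs).1 ≠ b then 1 else 0) := by
  induction rs generalizing a with
  | nil => exact absurd rfl h
  | cons p rs ih =>
    obtain ⟨v, c⟩ := p
    cases rs with
    | nil =>
      simp only [runCount, lastP, cnt1, List.headD_cons] at *
      have : (c = 1 ∧ v ≠ a ∧ v ≠ b) ↔ (c = 1 ∧ v ≠ b) := by
        constructor
        · rintro ⟨h1, _, h3⟩; exact ⟨h1, h3⟩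
        · rintro ⟨h1, h3⟩; exact ⟨h1, fun hv => ha hv.symm, h3⟩
      simp [this]
    | cons q t =>
      rw [runCount]
      have hchain := (List.isChain_cons_cons).1 hc
      rw [ih v (by simp) (by simpa using hchain.1) hchain.2]
      rw [show lastP ((v,c) :: q :: t) = lastP (q :: t) from lastP_cons _ _ (by simp),
          show ((v,c) :: q :: t).dropLast = (v,c) :: (q :: t).dropLast from rfl]
      have : (c = 1 ∧ v ≠ a ∧ v ≠ ((q :: t).headD (b, 0)).1) ↔ (c = 1) := by
        constructor
        · exact fun h => h.1
        · exact fun h1 => ⟨h1, fun hv => ha (by simp [hv]), by simpa using hchain.1⟩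
      simp only [this]
      simp only [cnt1, List.countP_cons]
      by_cases h1 : c = 1 <;> simp [h1] <;> ring

theorem Wnat_eq_midC (l : List Int) :
    ((List.range (l.length - 2)).countP
      (fun k => decide (l.getD (k+1) 0 ≠ l.getD k 0 ∧ l.getD (k+1) 0 ≠ l.getD (k+2) 0)) : Int)
      = midC l := by
  induction l with
  | nil => simp [midC]
  | cons a l ih =>
    match l, ih with
    | [], _ => simp [midC]
    | [x], _ => simp [midC]
    | x :: y :: t, ih =>
      have hlen : (a :: x :: y :: t).length - 2 = ((x :: y :: t).length - 2) + 1 := by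
        simp
      rw [hlen, List.range_succ_eq_map, List.countP_cons, List.countP_map, midC]
      have hfun : ((fun k => decide ((a::x::y::t).getD (k+1) 0 ≠ (a::x::y::t).getD k 0 ∧
            (a::x::y::t).getD (k+1) 0 ≠ (a::x::y::t).getD (k+2) 0)) ∘ Nat.succ)
          = (fun k => decide ((x::y::t).getD (k+1) 0 ≠ (x::y::t).getD k 0 ∧
            (x::y::t).getD (k+1) 0 ≠ (x::y::t).getD (k+2) 0)) := by
        funext k
        simp [Function.comp]
      rw [hfun]
      simp only [List.getD_cons_succ, List.getD_cons_zero]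
      rw [← ih]
      by_cases h : x ≠ a ∧ x ≠ y <;> simp [h] <;> ring

theorem lin_eq_midC (x b : Int) (xs : List Int) (h : xs ≠ []) :
    lin x xs b = midC (x :: xs)
      + (if lastD (x :: xs) ≠ slastD (x :: xs) ∧ lastD (x :: xs) ≠ b then 1 else 0) := by
  induction xs generalizing x with
  | nil => exact absurd rfl h
  | cons y t ih =>
    cases t with
    | nil => simp [lin, midC, lastD, slastD]
    | cons z t' =>
      rw [lin, show (z :: t').headD b = z from rfl, midC, ih y (by simp)]
      have h1 : lastD (x :: y :: z :: t') = lastD (y :: z :: t') := lastD_cons _ _ (by simp)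
      have h2 : slastD (x :: y :: z :: t') = slastD (y :: z :: t') := by
        show lastD (x :: y :: z :: t').dropLast = lastD (y :: z :: t').dropLast
        rw [show (x :: y :: z :: t').dropLast = x :: (y :: z :: t').dropLast from rfl]
        exact lastD_cons _ _ (by simp [List.dropLast_cons_of_ne_nil])
      rw [h1, h2]
      ring

theorem interior_eq_midC (l : List Int) :
    (PySem.List.pyRange 1 (PySem.List.len l - 1) 1).foldl
      (fun acc x =>
        if PySem.List.pyGetD l x 0 ≠ PySem.List.pyGetD l (x - 1) 0 ∧
           PySem.List.pyGetD l x 0 ≠ PySem.List.pyGetD l (x + 1) 0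
        then acc + 1 else acc) 0 = midC l := by
  rw [PySem.List.foldl_ite_add_one, PySem.List.len_eq, PySem.List.pyRange_one, List.countP_map]
  have hfun : ∀ k : Nat,
      ((fun x => decide (PySem.List.pyGetD l x 0 ≠ PySem.List.pyGetD l (x - 1) 0 ∧
          PySem.List.pyGetD l x 0 ≠ PySem.List.pyGetD l (x + 1) 0)) ∘ (fun k : Nat => (1 : Int) + k)) k
        = decide (l.getD (k+1) 0 ≠ l.getD k 0 ∧ l.getD (k+1) 0 ≠ l.getD (k+2) 0) := by
    intro k
    have e1 : (1 : Int) + (k : Int) = ((k + 1 : Nat) : Int) := by push_cast; ring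
    have e2 : (1 : Int) + (k : Int) - 1 = ((k : Nat) : Int) := by push_cast; ring
    have e3 : (1 : Int) + (k : Int) + 1 = ((k + 2 : Nat) : Int) := by push_cast; ring
    simp only [Function.comp]
    simp only [e2, e3]
    simp only [e1]
    simp only [PySem.List.pyGetD_natCast]
  have hrange : ((l.length : Int) - 1 - 1).toNat = l.length - 2 := by omega
  rw [funext hfun] at *
  rw [hrange, zero_add]
  exact Wnat_eq_midC l

theorem pyGetD_neg_one_lastD (l : List Int) (h : l ≠ []) :
    PySem.List.pyGetD l (-1) 0 = lastD l := by
  rw [PySem.List.pyGetD_neg_one l 0 h, lastD, List.getLast?_eq_some_getLast h]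
  rfl

theorem pyGetD_neg_two_slastD (l : List Int) (h : 2 ≤ l.length) :
    PySem.List.pyGetD l (-2) 0 = slastD l := by
  rw [PySem.List.pyGetD_neg_ofNat l 2 0 (by omega) (by omega)]
  have hd : l.dropLast ≠ [] := by
    intro he
    have := congrArg List.length he
    simp at this; omega
  rw [slastD, lastD, List.getLast?_eq_some_getLast hd]
  show _ = l.dropLast.getLast hd
  rw [List.getLast_eq_getElem, List.getElem_dropLast]
  congr 1
  simp
  omega

theorem count_isolated_eq_lin (l : List Int) (h : 2 ≤ l.length) :
    count_isolated l = lin (lastD l) l (l.headD 0) := by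
  match l, h with
  | x :: y :: t, h =>
    have hlin : lin (lastD (x::y::t)) (x::y::t) ((x::y::t).headD 0)
        = (if x ≠ lastD (x::y::t) ∧ x ≠ y then 1 else 0)
          + (midC (x::y::t)
             + (if lastD (x::y::t) ≠ slastD (x::y::t) ∧ lastD (x::y::t) ≠ x then 1 else 0)) := by
      rw [show ((x::y::t) : List Int).headD 0 = x from rfl]
      rw [show lin (lastD (x::y::t)) (x::y::t) x
            = (if x ≠ lastD (x::y::t) ∧ x ≠ (y::t).headD x then 1 else 0) + lin x (y::t) x
          from rfl]
      rw [show ((y::t) : List Int).headD x = y from rfl]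
      rw [lin_eq_midC x x (y::t) (by simp)]
    rw [hlin, count_isolated]
    have hlen2 : ¬ (PySem.List.len (x::y::t) < 2) := by
      rw [PySem.List.len_eq]; simp
    rw [if_neg hlen2, interior_eq_midC]
    rw [PySem.List.pyGetD_zero_cons x (y::t) 0]
    rw [show PySem.List.pyGetD (x::y::t) 1 0 = y by
      rw [show (1 : Int) = ((1 : Nat) : Int) by norm_num, PySem.List.pyGetD_natCast]; rfl]
    rw [pyGetD_neg_one_lastD (x::y::t) (by simp), pyGetD_neg_two_slastD (x::y::t) (by simp)]
    split_ifs <;> dsimp only <;> omega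

theorem head_runsOf (l : List Int) (h : l ≠ []) :
    ((runsOf l).headD (0, 0)).1 = l.headD 0 := by
  cases l with
  | nil => exact absurd rfl h
  | cons x xs => rw [runsOf]; rfl

theorem cnt1_append_last (rs : List (Int × Int)) (h : rs ≠ []) :
    cnt1 rs = cnt1 rs.dropLast + (if (lastP rs).2 = 1 then 1 else 0) := by
  conv_lhs => rw [← List.dropLast_append_getLast h]
  rw [cnt1, List.countP_append]
  rw [show lastP rs = rs.getLast h by rw [lastP, List.getLast?_eq_some_getLast h]; rfl]
  by_cases h1 : (rs.getLast h).2 = 1 <;> simp [cnt1, h1]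

theorem getLast_eq_lastP (rs : List (Int × Int)) (h : rs ≠ []) :
    rs.getLast h = lastP rs := by
  rw [lastP, List.getLast?_eq_some_getLast h]; rfl

theorem count_isolated_alt_eq (l : List Int) (h : 2 ≤ l.length) :
    count_isolated_alt l = lin (lastD l) l (l.headD 0) := by
  have hne : l ≠ [] := by intro he; rw [he] at h; simp at h
  have hlen2 : ¬ (PySem.List.len l < 2) := by rw [PySem.List.len_eq]; omega
  rw [lin_eq_runCount, count_isolated_alt]
  simp only [hlen2, if_false]
  rcases hr : runsOf l with _ | ⟨⟨v1, c1⟩, rs'⟩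
  · exact absurd hr (runsOf_ne_nil l hne)
  · have hb : l.headD 0 = v1 := by
      have := head_runsOf l hne; rw [hr] at this; simpa using this.symm
    have ha : lastD l = (lastP (runsOf l)).1 := (lastP_runsOf l hne).symm
    cases rs' with
    | nil =>
      -- single run: the whole list is constant, no isolated element
      have hc : c1 = (l.length : Int) := runsOf_singleton_total l v1 c1 hr
      rw [ha, hr, runCount, runCount]
      dsimp only
      simp only [PySem.List.foldl_ite_add_one, List.headD_nil]
      have h1 : ¬ (c1 = 1) := by omega
      simp [h1]
    | cons r t =>
      have hchain : List.IsChain (fun p q : Int × Int => p.1 ≠ q.1) (runsOf l) := isChain_runsOf l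
      rw [hr] at hchain
      have hch := List.isChain_cons_cons.1 hchain
      have hv1r : v1 ≠ r.1 := by simpa using hch.1
      have hcpos := counts_pos l
      rw [hr] at hcpos
      have hc1 : 1 ≤ c1 := by simpa using hcpos (v1, c1) (by simp)
      have hck : 1 ≤ (lastP (r :: t)).2 := by
        apply hcpos
        have : lastP (r :: t) ∈ r :: t := by
          rw [← getLast_eq_lastP (r :: t) (by simp)]
          exact List.getLast_mem _
        simp [this]
      rw [ha, hr]
      rw [show lastP ((v1, c1) :: r :: t) = lastP (r :: t) from lastP_cons _ _ (by simp)]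
      rw [runCount]
      rw [runCount_eq_cnt1 (r :: t) v1 (l.headD 0) (by simp) (by simpa using hv1r) hch.2]
      dsimp only
      simp only [getLast_eq_lastP]
      by_cases hm : v1 = (lastP (r :: t)).1
      · rw [if_pos hm]
        rw [PySem.List.foldl_ite_add_one]
        have hsum : ¬ ((c1 + (lastP (r :: t)).2) = 1) := by omega
        have hfalse : ¬ (c1 = 1 ∧ v1 ≠ (lastP (r :: t)).1 ∧ v1 ≠ ((r :: t).headD (l.headD 0, 0)).1) := by
          rintro ⟨_, h2, _⟩; exact h2 hm
        rw [if_neg hfalse]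
        have hlast2 : ¬ ((lastP (r :: t)).2 = 1 ∧ (lastP (r :: t)).1 ≠ l.headD 0) := by
          rintro ⟨_, h2⟩; rw [hb] at h2; exact h2 (hm ▸ rfl)
        rw [if_neg hlast2]
        simp [cnt1, hsum]
      · rw [if_neg hm]
        rw [PySem.List.foldl_ite_add_one, zero_add]
        have hcond : (c1 = 1 ∧ v1 ≠ (lastP (r :: t)).1 ∧ v1 ≠ ((r :: t).headD (l.headD 0, 0)).1) ↔ c1 = 1 := by
          constructor
          · exact fun h => h.1
          · exact fun h1 => ⟨h1, hm, by simpa using hv1r⟩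
        rw [if_congr hcond rfl rfl]
        have hlcond : ((lastP (r :: t)).2 = 1 ∧ (lastP (r :: t)).1 ≠ l.headD 0) ↔ (lastP (r :: t)).2 = 1 := by
          constructor
          · exact fun h => h.1
          · exact fun h1 => ⟨h1, by rw [hb]; exact fun he => hm he.symm⟩
        rw [if_congr hlcond rfl rfl]
        have hsplit := cnt1_append_last (r :: t) (by simp)
        simp only [cnt1] at hsplit ⊢
        rw [List.countP_cons]
        by_cases h1 : c1 = 1 <;> by_cases h2 : (lastP (r :: t)).2 = 1 <;>
          simp [h1, h2] at hsplit ⊢ <;> omega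

-- ===== VERDICT (by name: the statement is the Claim_ definition above) =====
theorem count_isolated_spec : Claim_equal_count_isolated := by
  intro l _
  unfold Spec_count_isolated
  by_cases h : 2 ≤ l.length
  · rw [count_isolated_eq_lin l h, count_isolated_alt_eq l h]
  · have hlt : ((l.length : Int)) < 2 := by omega
    simp [count_isolated, count_isolated_alt, PySem.List.len_eq, hlt]
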